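-- pv_equiv track=rewrite | github.com/zeanguyen1422/dsa_cover | leetcode_beginner/solve_leetcode.py | cl
-- ===== SOURCE A (Python) =====
-- def cl(array):
--
--     if len(array) == 0:
--         return 0
--
--     max_so_far = array[0][-1]
--     min_so_far = array[0][0]
--
--     max_value = 0
--
--     for i in range(1, len(array)):
--
--         loop_array_value = array[i]
--         cur_max = loop_array_value[-1] # loop inside dùng cái variable ở trên
--         cur_min = loop_array_value[0]
--
--         max_value = max(max_value, abs(cur_max - min_so_far), abs(max_so_far - cur_min))
--
--         min_so_far = min(min_so_far, cur_min)
--         max_so_far = max(max_so_far, cur_max)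
--
--         # update rồi 2 lần loop 1 2
--
--     return max_value
-- ===== SOURCE B (Python) =====
-- def cl(array):
--     if not array:
--         return 0
--     firsts = [row[0] for row in array]
--     lasts = [row[-1] for row in array]
--     # prefix tables: pref_min[i] = min(firsts[:i+1]), pref_max[i] = max(lasts[:i+1])
--     pref_min = []
--     pref_max = []
--     lo, hi = firsts[0], lasts[0]
--     for f, l in zip(firsts, lasts):
--         lo = min(lo, f)
--         hi = max(hi, l)
--         pref_min.append(lo)
--         pref_max.append(hi)
--     ans = 0
--     for f, l, pm, pM in zip(firsts[1:], lasts[1:], pref_min, pref_max):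
--         ans = max(ans, abs(l - pm), abs(pM - f))
--     return ans
-- ===== Notes on version B (the rewrite author's own statement) =====
-- stated objective: alternative
-- what changed: Replaces A's single fold carrying running min/max/answer state with a two-pass decomposition: first materialise prefix-min/prefix-max tables over the rows' first/last elements, then a separate zip pass combines each row with the prefix aggregates of the strictly earlier rows.
import Mathlib
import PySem

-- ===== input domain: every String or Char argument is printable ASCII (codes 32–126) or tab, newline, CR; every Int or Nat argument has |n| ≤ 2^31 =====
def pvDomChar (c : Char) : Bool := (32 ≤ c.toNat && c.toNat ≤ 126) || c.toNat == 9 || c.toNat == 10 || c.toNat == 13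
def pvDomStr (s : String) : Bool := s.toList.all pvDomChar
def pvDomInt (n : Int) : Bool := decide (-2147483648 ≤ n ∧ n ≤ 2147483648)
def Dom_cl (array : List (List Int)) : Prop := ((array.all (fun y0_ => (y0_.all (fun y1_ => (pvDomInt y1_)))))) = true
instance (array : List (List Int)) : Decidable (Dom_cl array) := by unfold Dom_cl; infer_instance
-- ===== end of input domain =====

-- B builds prefix min/max tables in a first pass and combines them with each row in a
-- second pass, instead of A's single fold carrying running aggregates.

-- ===== PORT A =====
-- row[0] / row[-1]; exact whenever row ≠ [] (Pre_cl guarantees this; Python raises IndexError on [])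
def clFirst (row : List Int) : Int := row.headD 0
def clLast (row : List Int) : Int := row.getLastD 0

def cl (array : List (List Int)) : Int :=
  match array with
  | [] => 0
  | a0 :: rest =>
    -- for i in range(1, len(array)): fold over the remaining rows with (min_so_far, max_so_far, max_value)
    let st := rest.foldl
      (fun (s : Int × Int × Int) row =>
        let curMax := clLast row
        let curMin := clFirst row
        let mv := max s.2.2 (max |curMax - s.1| |s.2.1 - curMin|)
        (min s.1 curMin, max s.2.1 curMax, mv))
      (clFirst a0, clLast a0, 0)
    st.2.2

-- ===== PORT B =====
-- B's first loop: append (min lo f, max hi l) for each (f, l); cons-recursion is the list-append loop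
def clPref : List (Int × Int) → Int → Int → List (Int × Int)
  | [], _, _ => []
  | (f, l) :: rest, lo, hi =>
      (min lo f, max hi l) :: clPref rest (min lo f) (max hi l)

def cl_alt (array : List (List Int)) : Int :=
  match array with
  | [] => 0
  | _ =>
    let firsts := array.map clFirst
    let lasts := array.map clLast
    let prefs := clPref (firsts.zip lasts) (firsts.headD 0) (lasts.headD 0)
    -- second loop: zip row i (i ≥ 1) with the prefix aggregates of rows < i
    ((firsts.tail.zip lasts.tail).zip prefs).foldl
      (fun ans p => max ans (max |p.1.2 - p.2.1| |p.2.2 - p.1.1|)) 0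

-- ===== PRECONDITION & SPEC =====
-- Pre_cl excludes arrays containing an empty row: there the Python A raises IndexError
-- (array[i][0] / array[i][-1]), and B raises the same IndexError.
def Pre_cl (array : List (List Int)) : Prop := ∀ row ∈ array, row ≠ []
instance (array : List (List Int)) : Decidable (Pre_cl array) := by unfold Pre_cl; infer_instance
def pvWitness_cl : List (List Int) := [[1, 2], [3]]

def Spec_cl (array : List (List Int)) (out : Int) : Prop := out = cl_alt array
instance (array : List (List Int)) (out : Int) : Decidable (Spec_cl array out) := by unfold Spec_cl; infer_instance

-- ===== CLAIM (what is proved, stated in full; the proofs are below) =====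
def Claim_equal_cl : Prop := ∀ (array : List (List Int)), Dom_cl array → Pre_cl array → Spec_cl array (cl array)

-- ===== LEMMAS AND PROOFS =====

-- main invariant: A's fold over the remaining rows equals B's zip pass against the
-- cons'd prefix table, for any initial aggregates (mn, mx) and accumulator mv
theorem cl_fold_eq (rest : List (List Int)) (mn mx mv : Int) :
    (rest.foldl
      (fun (s : Int × Int × Int) row =>
        let curMax := clLast row
        let curMin := clFirst row
        let mv := max s.2.2 (max |curMax - s.1| |s.2.1 - curMin|)
        (min s.1 curMin, max s.2.1 curMax, mv))
      (mn, mx, mv)).2.2 =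
    (((rest.map clFirst).zip (rest.map clLast)).zip
        ((mn, mx) :: clPref ((rest.map clFirst).zip (rest.map clLast)) mn mx)).foldl
      (fun ans p => max ans (max |p.1.2 - p.2.1| |p.2.2 - p.1.1|)) mv := by
  induction rest generalizing mn mx mv with
  | nil => simp
  | cons r rs ih =>
    simp only [List.map_cons, List.zip_cons_cons, List.foldl_cons, clPref]
    exact ih (min mn (clFirst r)) (max mx (clLast r)) _

theorem cl_eq (array : List (List Int)) : cl array = cl_alt array := by
  cases array with
  | nil => rfl
  | cons a0 rest =>
    simp only [cl, cl_alt, List.map_cons, List.headD_cons, List.tail_cons,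
      List.zip_cons_cons, clPref, min_self, max_self]
    exact cl_fold_eq rest (clFirst a0) (clLast a0) 0

-- ===== VERDICT (by name: the statement is the Claim_ definition above) =====
theorem cl_spec : Claim_equal_cl := by
  intro array _ _
  exact cl_eq array
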